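-- pv_equiv track=rewrite | github.com/Sakhile-Mbane/HDCSCodingEvening2022Q1 | Morse code.py | encrytion
-- ===== SOURCE A (Python) =====
-- morse_map = {'A':'.-','B':'-...','C':'-.-.','D' : '-..', 'E':'.','F':'..-.','G':'--.', 'H':'....',
--                     'I':'..', 'J':'.---', 'K':'-.-',
--                     'L':'.-..', 'M':'--', 'N':'-.',
--                     'O':'---', 'P':'.--.', 'Q':'--.-',
--                     'R':'.-.', 'S':'...', 'T':'-',
--                     'U':'..-', 'V':'...-', 'W':'.--',
--                     'X':'-..-', 'Y':'-.--', 'Z':'--..'}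
--
-- def encrytion(message):
--     ciphertext = ''
--     for letter in message:
--         if letter != ' ':
--             ciphertext += morse_map[letter] + ' '
--         else:
--             ciphertext += ' '
--     return ciphertext
-- ===== SOURCE B (Python) =====
-- MORSE_CODES = ['.-', '-...', '-.-.', '-..', '.', '..-.', '--.', '....', '..', '.---',
--                '-.-', '.-..', '--', '-.', '---', '.--.', '--.-', '.-.', '...', '-',
--                '..-', '...-', '.--', '-..-', '-.--', '--..']
--
--
-- def _encode_word(word):
--     return ''.join(MORSE_CODES[ord(c) - 65] + ' ' for c in word)
--
--
-- def encrytion(message):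
--     return ' '.join(_encode_word(w) for w in message.split(' '))
-- ===== Notes on version B (the rewrite author's own statement) =====
-- stated objective: alternative
-- what changed: B replaces A's dict-keyed per-character accumulator loop with a staged pipeline: split the message into words at spaces, encode each word by indexing a 26-entry code array at ord(c)-65, and rejoin the encoded words with single spaces.
import Mathlib
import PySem

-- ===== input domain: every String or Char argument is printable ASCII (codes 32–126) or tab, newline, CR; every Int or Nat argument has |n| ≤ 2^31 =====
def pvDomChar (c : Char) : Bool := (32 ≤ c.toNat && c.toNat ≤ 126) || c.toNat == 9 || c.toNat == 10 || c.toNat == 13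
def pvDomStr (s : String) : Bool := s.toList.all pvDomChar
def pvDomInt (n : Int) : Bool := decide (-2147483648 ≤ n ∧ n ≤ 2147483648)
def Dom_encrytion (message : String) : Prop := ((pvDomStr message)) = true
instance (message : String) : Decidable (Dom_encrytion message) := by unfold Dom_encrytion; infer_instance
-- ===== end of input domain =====

-- B replaces A's dict-keyed per-character accumulator loop with a staged pipeline (split into
-- words, encode each word by indexing a 26-entry code array at ord(c)-65, rejoin with spaces);
-- objective: alternative decomposition and data structure, same cost. Return values agree on Pre_.

-- ===== PORT A =====
def morseMap : PySem.Dict Char (List Char) := PySem.Dict.ofList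
  [('A', ".-".toList), ('B', "-...".toList), ('C', "-.-.".toList), ('D', "-..".toList),
   ('E', ".".toList), ('F', "..-.".toList), ('G', "--.".toList), ('H', "....".toList),
   ('I', "..".toList), ('J', ".---".toList), ('K', "-.-".toList),
   ('L', ".-..".toList), ('M', "--".toList), ('N', "-.".toList),
   ('O', "---".toList), ('P', ".--.".toList), ('Q', "--.-".toList),
   ('R', ".-.".toList), ('S', "...".toList), ('T', "-".toList),
   ('U', "..-".toList), ('V', "...-".toList), ('W', ".--".toList),
   ('X', "-..-".toList), ('Y', "-.--".toList), ('Z', "--..".toList)]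

-- literal port of A's loop; morse_map[letter] would raise KeyError on letters outside the
-- map — those inputs are excluded by Pre_encrytion, so getD's default is never reached there
def encrytion (message : String) : String :=
  String.ofList (message.toList.foldl
    (fun ciphertext letter =>
      if letter ≠ ' ' then ciphertext ++ morseMap.getD letter [] ++ [' ']
      else ciphertext ++ [' ']) [])

-- ===== PORT B =====
-- the 26-entry code array MORSE_CODES (indexed by ord(c) - 65, not a keyed dict)
def pyCodes : List (List Char) :=
  [".-".toList, "-...".toList, "-.-.".toList, "-..".toList, ".".toList, "..-.".toList,
   "--.".toList, "....".toList, "..".toList, ".---".toList, "-.-".toList, ".-..".toList,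
   "--".toList, "-.".toList, "---".toList, ".--.".toList, "--.-".toList, ".-.".toList,
   "...".toList, "-".toList, "..-".toList, "...-".toList, ".--".toList, "-..-".toList,
   "-.--".toList, "--..".toList]

-- ''.join(MORSE_CODES[ord(c) - 65] + ' ' for c in word); MORSE_CODES[…] would raise
-- IndexError past the end (excluded by Pre_), pyGetD is Python's indexing otherwise
def encodeWord (word : List Char) : List Char :=
  PySem.Chars.join [] (word.map (fun c => PySem.List.pyGetD pyCodes ((c.toNat : Int) - 65) [] ++ [' ']))

-- message.split(' ') ported as List.splitOn ' ' (exact for a one-character separator);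
-- ' '.join(...) ported as PySem.Chars.join [' ']
def encrytion_alt (message : String) : String :=
  String.ofList (PySem.Chars.join [' '] ((message.toList.splitOn ' ').map encodeWord))

-- ===== PRECONDITION & SPEC =====
-- Pre_ excludes exactly the inputs where Python A raises KeyError: any character other than
-- a space or an uppercase letter A–Z (the keys of morse_map).
def Pre_encrytion (message : String) : Prop :=
  (message.toList.all (fun c => c == ' ' || (decide (65 ≤ c.toNat) && decide (c.toNat ≤ 90)))) = true
instance (message : String) : Decidable (Pre_encrytion message) := by
  unfold Pre_encrytion; infer_instance

def pvWitness_encrytion : String := "SOS  HELP"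

def Spec_encrytion (message : String) (out : String) : Prop := out = encrytion_alt message
instance (message : String) (out : String) : Decidable (Spec_encrytion message out) := by
  unfold Spec_encrytion; infer_instance

-- ===== CLAIM (what is proved, stated in full; the proofs are below) =====
def Claim_equal_encrytion : Prop := ∀ (message : String), Dom_encrytion message → Pre_encrytion message → Spec_encrytion message (encrytion message)

-- ===== LEMMAS AND PROOFS =====

-- A's per-character contribution
def morseG (c : Char) : List Char :=
  if c ≠ ' ' then morseMap.getD c [] ++ [' '] else [' ']

-- B's per-character contribution (space chars never occur inside a word from splitOn ' ')
def altG (c : Char) : List Char :=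
  PySem.List.pyGetD pyCodes ((c.toNat : Int) - 65) [] ++ [' ']

theorem foldlA_eq (l acc : List Char) :
    l.foldl (fun ciphertext letter =>
      if letter ≠ ' ' then ciphertext ++ morseMap.getD letter [] ++ [' ']
      else ciphertext ++ [' ']) acc = acc ++ l.flatMap morseG := by
  induction l generalizing acc with
  | nil => simp
  | cons c l ih =>
    simp only [List.foldl_cons, List.flatMap_cons, ih, morseG]
    by_cases h : c = ' ' <;> simp [h]

theorem encodeWord_nil : encodeWord [] = [] := by
  simp [encodeWord, PySem.Chars.join_nil]

theorem encodeWord_cons (c : Char) (w : List Char) :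
    encodeWord (c :: w) = altG c ++ encodeWord w := by
  cases w with
  | nil => simp [encodeWord, altG, PySem.Chars.join_singleton, PySem.Chars.join_nil]
  | cons d w => simp [encodeWord, altG, PySem.Chars.join_cons_cons]

theorem join_cons_append (sep a b : List Char) (r : List (List Char)) :
    PySem.Chars.join sep ((a ++ b) :: r) = a ++ PySem.Chars.join sep (b :: r) := by
  cases r with
  | nil => simp [PySem.Chars.join_singleton]
  | cons q r => simp [PySem.Chars.join_cons_cons]

-- B's altG version of morseG, used as the common denominator
def altG' (c : Char) : List Char := if c ≠ ' ' then altG c else [' ']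

theorem joinSplit_eq (l : List Char) :
    PySem.Chars.join [' '] ((l.splitOn ' ').map encodeWord) = l.flatMap altG' := by
  induction l with
  | nil => simp [List.splitOn, List.splitOnP_nil, encodeWord_nil, PySem.Chars.join_singleton]
  | cons c l ih =>
    simp only [List.splitOn] at ih ⊢
    rw [List.splitOnP_cons]
    obtain ⟨w, ws, hws⟩ := List.exists_cons_of_ne_nil
      (List.splitOnP_ne_nil (fun x => x == ' ') l)
    by_cases h : c = ' '
    · subst h
      rw [if_pos (by simp), hws, List.map_cons, List.map_cons, encodeWord_nil,
        PySem.Chars.join_cons_cons, ← List.map_cons, ← hws, ih]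
      simp [altG']
    · have hb : (c == ' ') = false := by simp [h]
      rw [hb, if_neg (by simp), hws, List.modifyHead_cons, List.map_cons,
        encodeWord_cons, join_cons_append, ← List.map_cons, ← hws, ih]
      simp [altG', h]

-- on the admitted characters the dict lookup and the array index agree
theorem morseG_eq_altG' (c : Char)
    (hc : (c == ' ' || (decide (65 ≤ c.toNat) && decide (c.toNat ≤ 90))) = true) :
    morseG c = altG' c := by
  by_cases h : c = ' '
  · simp [morseG, altG', h]
  · simp [h] at hc
    obtain ⟨h1, h2⟩ := hc
    interval_cases hn : c.toNat <;> (rw [← Char.ofNat_toNat c, hn]; decide)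

-- ===== VERDICT (by name: the statement is the Claim_ definition above) =====
theorem encrytion_spec : Claim_equal_encrytion := by
  intro message _ hpre
  unfold Spec_encrytion encrytion encrytion_alt
  rw [foldlA_eq, joinSplit_eq, List.nil_append]
  congr 1
  unfold Pre_encrytion at hpre
  rw [List.all_eq_true] at hpre
  exact List.flatMap_congr (fun x hx => morseG_eq_altG' x (hpre x hx))
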